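-- pv_equiv track=rewrite | github.com/A-Lex-McLee/RecursiveTreeExtraction | ReBracketing.py | _countIdx_to_nextBracket
-- ===== SOURCE A (Python) =====
-- def _countIdx_to_nextBracket(restString: str) -> tuple[str, int]:
--     countIdx: int = 0
--     while countIdx < len(restString):
--         if restString[countIdx] == '(':
--             return 'OPEN', countIdx
--         if restString[countIdx] == ')':
--             return 'CLOSE', countIdx
--         countIdx += 1
--     return "", -1
-- ===== SOURCE B (Python) =====
-- def _countIdx_to_nextBracket(restString: str) -> tuple[str, int]:
--     o = restString.find('(')
--     c = restString.find(')')
--     if o == -1 and c == -1: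
--         return "", -1
--     if c == -1 or (o != -1 and o < c):
--         return 'OPEN', o
--     return 'CLOSE', c
-- ===== Notes on version B (the rewrite author's own statement) =====
-- stated objective: faster
-- what changed: Replaces the manual indexed while-loop with two str.find library scans ('(' and ')') plus an explicit -1 reconciliation picking the smaller found index.
import Mathlib
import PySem

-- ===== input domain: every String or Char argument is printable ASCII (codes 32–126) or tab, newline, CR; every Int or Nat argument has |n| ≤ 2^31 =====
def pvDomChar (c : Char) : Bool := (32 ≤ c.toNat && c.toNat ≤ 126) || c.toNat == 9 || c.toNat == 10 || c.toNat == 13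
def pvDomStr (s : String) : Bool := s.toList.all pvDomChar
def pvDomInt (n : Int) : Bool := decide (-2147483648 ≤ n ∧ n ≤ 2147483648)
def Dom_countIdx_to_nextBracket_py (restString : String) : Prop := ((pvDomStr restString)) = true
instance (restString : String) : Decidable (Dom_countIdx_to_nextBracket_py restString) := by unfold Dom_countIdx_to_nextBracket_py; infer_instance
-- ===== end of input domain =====

-- B replaces A's single indexed while-loop with two library find scans plus a -1 reconciliation (idiomatic).

-- ===== PORT A =====
-- the while-loop over countIdx, as structural recursion over the remaining characters with the running index
def pvAGo : List Char → Int → String × Int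
  | [], _ => ("", -1)
  | ch :: rest, i =>
    if ch = '(' then ("OPEN", i)
    else if ch = ')' then ("CLOSE", i)
    else pvAGo rest (i + 1)

def countIdx_to_nextBracket_py (restString : String) : String × Int :=
  pvAGo restString.toList 0

-- ===== PORT B =====
def countIdx_to_nextBracket_py_alt (restString : String) : String × Int :=
  let o := PySem.Str.find restString "("
  let c := PySem.Str.find restString ")"
  if o = -1 ∧ c = -1 then ("", -1)
  else if c = -1 ∨ (o ≠ -1 ∧ o < c) then ("OPEN", o)
  else ("CLOSE", c)

-- ===== PRECONDITION & SPEC =====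
def Spec_countIdx_to_nextBracket_py (restString : String) (out : String × Int) : Prop := out = countIdx_to_nextBracket_py_alt restString
instance (restString : String) (out : String × Int) : Decidable (Spec_countIdx_to_nextBracket_py restString out) := by unfold Spec_countIdx_to_nextBracket_py; infer_instance

-- ===== CLAIM (what is proved, stated in full; the proofs are below) =====
def Claim_equal_countIdx_to_nextBracket_py : Prop := ∀ (restString : String), Dom_countIdx_to_nextBracket_py restString → Spec_countIdx_to_nextBracket_py restString (countIdx_to_nextBracket_py restString)

-- ===== LEMMAS AND PROOFS =====

-- singleton infix is membership
theorem pv_singleton_infix_iff {c : Char} {l : List Char} : [c] <:+: l ↔ c ∈ l := by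
  constructor
  · rintro ⟨s, t, h⟩; subst h; simp
  · intro h
    obtain ⟨u, v, h⟩ := List.append_of_mem h
    exact ⟨u, v, by simp [h]⟩

theorem pv_find_nil (sub : List Char) (h : sub ≠ []) : PySem.Chars.find ([] : List Char) sub = -1 := by
  rw [PySem.Chars.find_eq_neg_one_iff]
  intro hin
  exact h (List.infix_nil.mp hin)

-- find = n from "prefix at n, none before"
theorem pv_find_eq_of (s sub : List Char) (n : ℕ)
    (hpre : sub <+: s.drop n) (hmin : ∀ i < n, ¬ sub <+: s.drop i) :
    PySem.Chars.find s sub = (n : Int) := by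
  have hin : PySem.Chars.isIn sub s = true := by
    rw [← PySem.Chars.exists_prefix_drop_iff_isIn]; exact ⟨n, hpre⟩
  have hnn : 0 ≤ PySem.Chars.find s sub := by
    rw [PySem.Chars.find_nonneg_iff]
    exact (PySem.Chars.isIn_iff_infix sub s).mp hin
  obtain ⟨hp, hm⟩ := PySem.Chars.find_spec hnn
  have h1 : ¬ n < (PySem.Chars.find s sub).toNat := fun hlt => hm n hlt hpre
  have h2 : ¬ (PySem.Chars.find s sub).toNat < n := fun hlt => hmin _ hlt hp
  have : (PySem.Chars.find s sub).toNat = n := by omega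
  omega

-- cons characterization of find for a singleton pattern
theorem pv_find_single_cons (a c : Char) (s : List Char) :
    PySem.Chars.find (a :: s) [c] =
      if a = c then 0
      else if PySem.Chars.find s [c] = -1 then -1 else PySem.Chars.find s [c] + 1 := by
  by_cases hac : a = c
  · subst hac
    rw [if_pos rfl]
    show PySem.Chars.find (a :: s) [a] = ((0 : ℕ) : Int)
    exact pv_find_eq_of _ _ 0 (by simp) (by omega)
  · simp only [if_neg hac]
    by_cases hf : PySem.Chars.find s [c] = -1
    · simp only [if_pos hf]
      rw [PySem.Chars.find_eq_neg_one_iff] at hf ⊢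
      rw [pv_singleton_infix_iff] at hf ⊢
      simp [hf, (Ne.symm hac : c ≠ a)]
    · simp only [if_neg hf]
      have hnn : 0 ≤ PySem.Chars.find s [c] := by
        have := PySem.Chars.neg_one_le_find s [c]
        omega
      obtain ⟨hp, hm⟩ := PySem.Chars.find_spec hnn
      set k := (PySem.Chars.find s [c]).toNat with hk
      have hkk : PySem.Chars.find s [c] = (k : Int) := by omega
      rw [hkk]
      have : ((k : Int) + 1) = ((k + 1 : ℕ) : Int) := by push_cast; ring
      rw [this]
      apply pv_find_eq_of
      · simpa using hp
      · intro i hi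
        match i with
        | 0 => simp [List.prefix_cons_iff, (Ne.symm hac : c ≠ a)]  -- drop 0 (a::s) = a::s, head is a ≠ c
        | (j+1) =>
          have : j < k := by omega
          simpa using hm j this

theorem pv_main (s : List Char) (i : Int) :
    pvAGo s i =
      (if PySem.Chars.find s ['('] = -1 ∧ PySem.Chars.find s [')'] = -1 then ("", -1)
       else if PySem.Chars.find s [')'] = -1 ∨
               (PySem.Chars.find s ['('] ≠ -1 ∧ PySem.Chars.find s ['('] < PySem.Chars.find s [')']) then
         ("OPEN", i + PySem.Chars.find s ['('])
       else ("CLOSE", i + PySem.Chars.find s [')'])) := by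
  induction s generalizing i with
  | nil => simp [pvAGo, pv_find_nil]
  | cons a s ih =>
    have ho := PySem.Chars.neg_one_le_find s ['(']
    have hc := PySem.Chars.neg_one_le_find s [')']
    show (if a = '(' then ("OPEN", i) else if a = ')' then ("CLOSE", i) else pvAGo s (i + 1)) = _
    rw [pv_find_single_cons, pv_find_single_cons, ih]
    split_ifs <;> simp_all <;> omega

-- ===== VERDICT (by name: the statement is the Claim_ definition above) =====
theorem countIdx_to_nextBracket_py_spec : Claim_equal_countIdx_to_nextBracket_py := by
  intro s _
  unfold Spec_countIdx_to_nextBracket_py countIdx_to_nextBracket_py countIdx_to_nextBracket_py_alt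
  rw [pv_main]
  simp [PySem.Str.find_eq]
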